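-- pv_equiv track=rewrite | github.com/Koeunseooooo/Algorithm | 프로그래머스/level1/옹알이(2).py | solution
-- ===== SOURCE A (Python) =====
-- def solution(babbling):
--     can = ["aya","ye","woo","ma"]
--     answer = 0
--
--     for b in babbling:
--         stack=''
--         prev='' # prev가 필요한 이유 : 같은 발음을 하는 것을 어려워 한다는 제한 사항 존재
--         for c in b:
--             stack+=c
--             if stack!=prev and stack in can:
--                 prev=stack
--                 stack=''
--         if len(stack)==0:
--             answer+=1
--
--
--     return answer
-- ===== SOURCE B (Python) =====
-- SYLLABLES = ("aya", "ye", "woo", "ma")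
--
--
-- def _can_say(word, prev):
--     # recursive descent: peel one allowed syllable (different from the previous
--     # one) off the front and recurse on the remaining suffix
--     if not word:
--         return True
--     for s in SYLLABLES:
--         if s != prev and word.startswith(s):
--             return _can_say(word[len(s):], s)
--     return False
--
--
-- def solution(babbling):
--     return sum(1 for b in babbling if _can_say(b, ""))
-- ===== Notes on version B (the rewrite author's own statement) =====
-- stated objective: simpler
-- what changed: A's per-character stack/prev accumulator loop is replaced by a recursive-descent parser that peels one allowed syllable (different from the previous one) off the front of each word and recurses on the suffix; counting becomes a single sum over the list.
import Mathlib
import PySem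

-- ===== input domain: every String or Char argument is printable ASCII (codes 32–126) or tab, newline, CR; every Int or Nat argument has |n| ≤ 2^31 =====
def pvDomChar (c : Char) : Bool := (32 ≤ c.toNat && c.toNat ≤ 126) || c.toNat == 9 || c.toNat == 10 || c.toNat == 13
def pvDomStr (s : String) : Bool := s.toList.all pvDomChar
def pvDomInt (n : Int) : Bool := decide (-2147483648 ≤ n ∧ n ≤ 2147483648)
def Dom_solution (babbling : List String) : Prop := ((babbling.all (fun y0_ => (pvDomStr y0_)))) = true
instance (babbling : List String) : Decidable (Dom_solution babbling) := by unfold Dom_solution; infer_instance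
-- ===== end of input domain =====

-- B replaces A's character-accumulating stack/prev loop by a recursive-descent
-- parser that peels one allowed syllable off the front of the word; simpler, same cost.

-- ===== PORT A =====
-- A's local strings 'stack'/'prev' are represented as List Char (stack += c → append; exact).
def pyCan : List (List Char) := [['a','y','a'], ['y','e'], ['w','o','o'], ['m','a']]

-- one iteration of A's inner 'for c in b' loop; state = (stack, prev)
def pyStep (st : List Char × List Char) (c : Char) : List Char × List Char :=
  let stack := st.1 ++ [c]
  if stack ≠ st.2 ∧ stack ∈ pyCan then ([], stack) else (stack, st.2)

def solution (babbling : List String) : Int :=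
  List.foldl (fun answer b =>
    let st := List.foldl pyStep ([], []) b.toList
    if st.1.length = 0 then answer + 1 else answer) 0 babbling

-- ===== PORT B =====
-- B's 'for s in SYLLABLES: if s != prev and word.startswith(s)' is ported as a
-- pattern match on the head of the word: the four syllable literals are
-- prefix-free, so at most one startswith succeeds, and when it is blocked by
-- s == prev no later syllable matches either — the arm returns false (exact).
def canSay : List Char → List Char → Bool
  | [], _ => true
  | 'a' :: 'y' :: 'a' :: rest, prev => (['a','y','a'] != prev) && canSay rest ['a','y','a']
  | 'y' :: 'e' :: rest, prev => (['y','e'] != prev) && canSay rest ['y','e']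
  | 'w' :: 'o' :: 'o' :: rest, prev => (['w','o','o'] != prev) && canSay rest ['w','o','o']
  | 'm' :: 'a' :: rest, prev => (['m','a'] != prev) && canSay rest ['m','a']
  | _, _ => false

def solution_alt (babbling : List String) : Int :=
  ((List.filter (fun b => canSay b.toList []) babbling).length : Int)

-- ===== PRECONDITION & SPEC =====
def Spec_solution (babbling : List String) (out : Int) : Prop := out = solution_alt babbling
instance (babbling : List String) (out : Int) : Decidable (Spec_solution babbling out) := by unfold Spec_solution; infer_instance

-- ===== CLAIM (what is proved, stated in full; the proofs are below) =====
def Claim_equal_solution : Prop := ∀ (babbling : List String), Dom_solution babbling → Spec_solution babbling (solution babbling)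

-- ===== LEMMAS AND PROOFS =====

-- proper prefixes of the allowed syllables: the only stacks from which A's loop can still empty
def pyPref : List (List Char) := [[], ['a'], ['a','y'], ['y'], ['w'], ['w','o'], ['m']]

-- a stack that is neither a syllable nor a proper prefix of one can never be consumed again
def Dead (s : List Char) : Prop := s ∉ pyCan ∧ s ∉ pyPref

theorem dead_push (s : List Char) (c : Char) (h : Dead s) : Dead (s ++ [c]) := by
  obtain ⟨h1, h2⟩ := h
  constructor <;> intro hmem <;>
  · rcases s with _ | ⟨x, _ | ⟨y, _ | ⟨z, s⟩⟩⟩ <;> simp_all [pyCan, pyPref] <;> tauto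

theorem dead_fold (cs : List Char) : ∀ s p, Dead s → (List.foldl pyStep (s, p) cs).1 ≠ [] := by
  induction cs with
  | nil =>
    intro s p h hs
    simp only [List.foldl_nil] at hs
    exact h.2 (by simp [hs, pyPref])
  | cons c cs ih =>
    intro s p h
    have hd := dead_push s c h
    rw [List.foldl_cons, show pyStep (s, p) c = (s ++ [c], p) from by
      simp only [pyStep]
      exact if_neg (by rintro ⟨-, hb⟩; exact hd.1 hb)]
    exact ih _ _ hd

theorem blocked (syll : List Char) (hs : syll ∈ pyCan) (c : Char) : Dead (syll ++ [c]) := by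
  simp only [pyCan, List.mem_cons, List.not_mem_nil, or_false] at hs
  rcases hs with rfl | rfl | rfl | rfl <;> constructor <;> simp [pyCan, pyPref]

-- once a whole syllable sits in the stack (the 'prev' block of A), the word is lost
theorem blocked_fold (cs : List Char) (syll p : List Char) (hs : syll ∈ pyCan) :
    (List.foldl pyStep (syll, p) cs).1 ≠ [] := by
  cases cs with
  | nil =>
    intro h; simp only [List.foldl_nil] at h; subst h
    simp [pyCan] at hs
  | cons c cs =>
    rw [List.foldl_cons, show pyStep (syll, p) c = (syll ++ [c], p) from by
      simp only [pyStep]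
      exact if_neg (by rintro ⟨-, hb⟩; exact (blocked syll hs c).1 hb)]
    exact dead_fold cs _ _ (blocked syll hs c)

-- a word that starts with no allowed syllable is lost
theorem fall_fold (t p : List Char)
    (h1 : ∀ rest, t ≠ 'a' :: 'y' :: 'a' :: rest) (h2 : ∀ rest, t ≠ 'y' :: 'e' :: rest)
    (h3 : ∀ rest, t ≠ 'w' :: 'o' :: 'o' :: rest) (h4 : ∀ rest, t ≠ 'm' :: 'a' :: rest)
    (h0 : t ≠ []) : (List.foldl pyStep ([], p) t).1 ≠ [] := by
  rcases t with _ | ⟨c0, t0⟩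
  · exact absurd rfl h0
  rw [List.foldl_cons, show pyStep ([], p) c0 = ([c0], p) from by simp [pyStep, pyCan]]
  by_cases ha : c0 = 'a'
  · subst ha
    rcases t0 with _ | ⟨c1, t1⟩
    · simp
    rw [List.foldl_cons, show pyStep (['a'], p) c1 = (['a', c1], p) from by simp [pyStep, pyCan]]
    by_cases hy : c1 = 'y'
    · subst hy
      rcases t1 with _ | ⟨c2, t2⟩
      · simp
      have hc2 : c2 ≠ 'a' := by rintro rfl; exact h1 t2 rfl
      rw [List.foldl_cons, show pyStep (['a','y'], p) c2 = (['a','y',c2], p) from by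
        simp [pyStep, pyCan, hc2]]
      exact dead_fold t2 _ _ ⟨by simp [pyCan, hc2], by simp [pyPref]⟩
    · exact dead_fold t1 _ _ ⟨by simp [pyCan], by simp [pyPref, hy]⟩
  by_cases hyy : c0 = 'y'
  · subst hyy
    rcases t0 with _ | ⟨c1, t1⟩
    · simp
    have he : c1 ≠ 'e' := by rintro rfl; exact h2 t1 rfl
    rw [List.foldl_cons, show pyStep (['y'], p) c1 = (['y', c1], p) from by
      simp [pyStep, pyCan, he]]
    exact dead_fold t1 _ _ ⟨by simp [pyCan, he], by simp [pyPref]⟩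
  by_cases hw : c0 = 'w'
  · subst hw
    rcases t0 with _ | ⟨c1, t1⟩
    · simp
    rw [List.foldl_cons, show pyStep (['w'], p) c1 = (['w', c1], p) from by simp [pyStep, pyCan]]
    by_cases ho : c1 = 'o'
    · subst ho
      rcases t1 with _ | ⟨c2, t2⟩
      · simp
      have ho2 : c2 ≠ 'o' := by rintro rfl; exact h3 t2 rfl
      rw [List.foldl_cons, show pyStep (['w','o'], p) c2 = (['w','o',c2], p) from by
        simp [pyStep, pyCan, ho2]]
      exact dead_fold t2 _ _ ⟨by simp [pyCan, ho2], by simp [pyPref]⟩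
    · exact dead_fold t1 _ _ ⟨by simp [pyCan], by simp [pyPref, ho]⟩
  by_cases hm : c0 = 'm'
  · subst hm
    rcases t0 with _ | ⟨c1, t1⟩
    · simp
    have hma : c1 ≠ 'a' := by rintro rfl; exact h4 t1 rfl
    rw [List.foldl_cons, show pyStep (['m'], p) c1 = (['m', c1], p) from by
      simp [pyStep, pyCan, hma]]
    exact dead_fold t1 _ _ ⟨by simp [pyCan, hma], by simp [pyPref]⟩
  exact dead_fold t0 _ _ ⟨by simp [pyCan], by simp [pyPref, ha, hyy, hw, hm]⟩

-- A's inner loop accepts a word iff B's recursive descent does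
theorem main_lemma (cs p : List Char) :
    ((List.foldl pyStep ([], p) cs).1 = []) ↔ canSay cs p = true := by
  fun_induction canSay cs p with
  | case1 p => simp
  | case2 rest prev ih =>
    rw [List.foldl_cons, show pyStep ([], prev) 'a' = (['a'], prev) from by simp [pyStep, pyCan]]
    rw [List.foldl_cons, show pyStep (['a'], prev) 'y' = (['a','y'], prev) from by
      simp [pyStep, pyCan]]
    by_cases hp : ['a','y','a'] = prev
    · subst hp
      rw [List.foldl_cons, show pyStep (['a','y'], ['a','y','a']) 'a'
          = (['a','y','a'], ['a','y','a']) from by simp [pyStep]]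
      simp [blocked_fold rest ['a','y','a'] ['a','y','a'] (by simp [pyCan])]
    · rw [List.foldl_cons, show pyStep (['a','y'], prev) 'a' = ([], ['a','y','a']) from by
        simp [pyStep, pyCan, hp]]
      simp [ih, hp]
  | case3 rest prev ih =>
    rw [List.foldl_cons, show pyStep ([], prev) 'y' = (['y'], prev) from by simp [pyStep, pyCan]]
    by_cases hp : ['y','e'] = prev
    · subst hp
      rw [List.foldl_cons, show pyStep (['y'], ['y','e']) 'e'
          = (['y','e'], ['y','e']) from by simp [pyStep]]
      simp [blocked_fold rest ['y','e'] ['y','e'] (by simp [pyCan])]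
    · rw [List.foldl_cons, show pyStep (['y'], prev) 'e' = ([], ['y','e']) from by
        simp [pyStep, pyCan, hp]]
      simp [ih, hp]
  | case4 rest prev ih =>
    rw [List.foldl_cons, show pyStep ([], prev) 'w' = (['w'], prev) from by simp [pyStep, pyCan]]
    rw [List.foldl_cons, show pyStep (['w'], prev) 'o' = (['w','o'], prev) from by
      simp [pyStep, pyCan]]
    by_cases hp : ['w','o','o'] = prev
    · subst hp
      rw [List.foldl_cons, show pyStep (['w','o'], ['w','o','o']) 'o'
          = (['w','o','o'], ['w','o','o']) from by simp [pyStep]]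
      simp [blocked_fold rest ['w','o','o'] ['w','o','o'] (by simp [pyCan])]
    · rw [List.foldl_cons, show pyStep (['w','o'], prev) 'o' = ([], ['w','o','o']) from by
        simp [pyStep, pyCan, hp]]
      simp [ih, hp]
  | case5 rest prev ih =>
    rw [List.foldl_cons, show pyStep ([], prev) 'm' = (['m'], prev) from by simp [pyStep, pyCan]]
    by_cases hp : ['m','a'] = prev
    · subst hp
      rw [List.foldl_cons, show pyStep (['m'], ['m','a']) 'a'
          = (['m','a'], ['m','a']) from by simp [pyStep]]
      simp [blocked_fold rest ['m','a'] ['m','a'] (by simp [pyCan])]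
    · rw [List.foldl_cons, show pyStep (['m'], prev) 'a' = ([], ['m','a']) from by
        simp [pyStep, pyCan, hp]]
      simp [ih, hp]
  | case6 t p h0 h1 h2 h3 h4 =>
    simp [fall_fold t p h1 h2 h3 h4 h0]

theorem sol_go (l : List String) : ∀ k : Int,
    List.foldl (fun answer b =>
      let st := List.foldl pyStep ([], []) b.toList
      if st.1.length = 0 then answer + 1 else answer) k l
    = k + ((List.filter (fun b => canSay b.toList []) l).length : Int) := by
  induction l with
  | nil => simp
  | cons b l ih =>
    intro k
    rw [List.foldl_cons, List.filter_cons, ih]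
    have hA : ((List.foldl pyStep ([], []) b.toList).1.length = 0) ↔ canSay b.toList [] = true := by
      rw [List.length_eq_zero_iff]; exact main_lemma _ _
    by_cases hb : canSay b.toList [] = true
    · simp only [hb, hA.mpr hb, if_pos]
      simp
      ring
    · have h2 : ¬((List.foldl pyStep ([], []) b.toList).1.length = 0) := fun h => hb (hA.mp h)
      simp [hb, h2]

-- ===== VERDICT (by name: the statement is the Claim_ definition above) =====
theorem solution_spec : Claim_equal_solution := by
  intro babbling _
  unfold Spec_solution solution solution_alt
  rw [sol_go]
  simp
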